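-- pv_equiv track=rewrite | github.com/XHXIAIEIN/orchestrator | src/core/fuzzy_edit.py | _strategy_whitespace_normalized
-- ===== SOURCE A (Python) =====
-- def _normalize_inline_whitespace(s: str) -> tuple[str, list[int]]:
--     """将行内连续 [ \\t]+ 替换为单个空格，构建位置映射。
--
--     返回 (normalized, orig_positions)，语义同 _build_orig_to_norm_map。
--     行分隔符（\\n、\\r\\n）原样保留，不参与合并。
--     """
--     normalized_chars: list[str] = []
--     orig_positions: list[int] = []
--     i = 0
--     n = len(s)
--
--     while i < n:
--         ch = s[i]
--         if ch in (" ", "\t"):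
--             # 收集连续空白（仅限行内空白，不包括换行）
--             j = i
--             while j < n and s[j] in (" ", "\t"):
--                 j += 1
--             # 用单个空格代表整段空白，orig_positions 记录区间起始
--             normalized_chars.append(" ")
--             orig_positions.append(i)
--             i = j
--         else:
--             normalized_chars.append(ch)
--             orig_positions.append(i)
--             i += 1
--
--     return "".join(normalized_chars), orig_positions
--
-- def _strategy_whitespace_normalized(text: str, pattern: str) -> list[tuple[int, int]]:
--     """合并行内连续空白后匹配，命中后映射回原始坐标。"""
--     norm_text, text_orig_pos = _normalize_inline_whitespace(text)
--     norm_pattern, _ = _normalize_inline_whitespace(pattern)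
--
--     if not norm_pattern:
--         return []
--
--     results: list[tuple[int, int]] = []
--     start = 0
--     plen = len(norm_pattern)
--
--     while True:
--         pos = norm_text.find(norm_pattern, start)
--         if pos == -1:
--             break
--
--         # 规范化坐标 → 原始坐标
--         orig_start = text_orig_pos[pos]
--
--         norm_end = pos + plen
--         if norm_end <= len(text_orig_pos):
--             # 末字符在原始文本中的位置 +1 = end（exclusive）
--             orig_end = text_orig_pos[norm_end - 1] + 1
--             # 但我们需要找到原始文本中对应的完整末尾
--             # 规范化末位 -1 对应原始的某个字符；原始 end 应向右延伸到
--             # 下一个"未被合并"的位置，即 text_orig_pos[norm_end - 1] + 1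
--             # 如果末字符是空格合并的起点，需要找到原始连续空白段的结尾
--             raw_end_char_idx = text_orig_pos[norm_end - 1]
--             # 向右扫描，跳过被合并进去的空白
--             while raw_end_char_idx + 1 < len(text) and text[raw_end_char_idx + 1] in (" ", "\t"):
--                 # 检查这段空白是否已被合并进规范化匹配末尾
--                 # 只有当 norm_end 处的规范化字符不是空格时才需要扩展
--                 # 安全起见：不扩展，只取第一个字符位置 +1
--                 break
--             orig_end = raw_end_char_idx + 1
--         else:
--             orig_end = len(text)
--
--         results.append((orig_start, orig_end))
--         start = pos + 1
--
--     return results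
-- ===== SOURCE B (Python) =====
-- def _normalize(s):
--     chars = []
--     pos = []
--     prev_ws = False
--     for i, ch in enumerate(s):
--         ws = ch in " \t"
--         if ws:
--             if not prev_ws:
--                 chars.append(" ")
--                 pos.append(i)
--         else:
--             chars.append(ch)
--             pos.append(i)
--         prev_ws = ws
--     return "".join(chars), pos
--
--
-- def _build_pi(p):
--     # KMP prefix function: pi[i] = length of longest proper border of p[:i+1]
--     pi = [0]
--     q = 0
--     for i in range(1, len(p)):
--         while q > 0 and p[i] != p[q]:
--             q = pi[q - 1]
--         if p[i] == p[q]: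
--             q += 1
--         pi.append(q)
--     return pi
--
--
-- def _strategy_whitespace_normalized(text, pattern):
--     nt, tp = _normalize(text)
--     np_, _ = _normalize(pattern)
--     if not np_:
--         return []
--     m = len(np_)
--     pi = _build_pi(np_)
--     results = []
--     q = 0
--     for i, c in enumerate(nt):
--         if q == m:
--             q = pi[m - 1]
--         while q > 0 and c != np_[q]:
--             q = pi[q - 1]
--         if c == np_[q]:
--             q += 1
--         if q == m:
--             results.append((tp[i - m + 1], tp[i] + 1))
--     return results
-- ===== Notes on version B (the rewrite author's own statement) =====
-- stated objective: alternative
-- what changed: Matching is done by the KMP algorithm (a precomputed prefix-function table and a single left-to-right scan carrying the automaton state, never re-comparing text characters) instead of A's repeated find/restart scans of the normalized text, and normalization is a single pass with a prev-whitespace flag instead of an inner skip-ahead loop.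
import Mathlib
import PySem

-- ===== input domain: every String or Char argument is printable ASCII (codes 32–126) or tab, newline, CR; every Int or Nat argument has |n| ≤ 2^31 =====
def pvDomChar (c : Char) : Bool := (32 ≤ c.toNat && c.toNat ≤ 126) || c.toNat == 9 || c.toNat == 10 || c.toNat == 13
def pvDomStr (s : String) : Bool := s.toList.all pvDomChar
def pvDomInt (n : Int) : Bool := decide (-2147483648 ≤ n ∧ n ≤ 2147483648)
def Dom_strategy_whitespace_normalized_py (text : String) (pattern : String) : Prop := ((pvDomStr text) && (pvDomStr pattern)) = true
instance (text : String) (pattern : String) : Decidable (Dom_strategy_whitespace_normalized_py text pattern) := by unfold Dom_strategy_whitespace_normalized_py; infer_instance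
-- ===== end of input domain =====

-- B replaces A's repeated find/restart scans of the normalized text by the KMP algorithm
-- (prefix-function table + one left-to-right scan carrying the automaton state), and A's
-- nested skip-ahead normalization loop by a one-flag single pass (objective: alternative;
-- same value everywhere).

-- ===== PORT A =====

-- `ch in (" ", "\t")`
def pvWs (c : Char) : Bool := c = ' ' || c = '\t'

-- inner `while j < n and s[j] in (" ", "\t"): j += 1` — number of steps taken
def pvSkipWs : List Char → Nat
  | [] => 0
  | c :: rest => if pvWs c then pvSkipWs rest + 1 else 0

-- outer `while i < n` of _normalize_inline_whitespace, on the suffix at i, carrying the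
-- original index i (the recorded positions); fuel only makes the jump recursion structural
def pvNormA : Nat → List Char → Int → List Char × List Int
  | 0, _, _ => ([], [])
  | fuel + 1, l, i =>
    match l with
    | [] => ([], [])
    | c :: rest =>
      if pvWs c then
        -- collect the whole whitespace run, emit one ' ' at its start
        let k := pvSkipWs (c :: rest)
        let r := pvNormA fuel ((c :: rest).drop k) (i + (k : Int))
        (' ' :: r.1, i :: r.2)
      else
        let r := pvNormA fuel rest (i + 1)
        (c :: r.1, i :: r.2)

-- `norm_text.find(norm_pattern, start)`: linear scan of the suffix; a window matches
-- iff take p.length = p (a shorter window has the wrong length)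
def pvFindFromAux (p : List Char) : List Char → Nat → Int
  | [], idx => if ([] : List Char).take p.length = p then (idx : Int) else -1
  | c :: rest, idx =>
    if (c :: rest).take p.length = p then (idx : Int) else pvFindFromAux p rest (idx + 1)

def pvFindFrom (t p : List Char) (start : Nat) : Int := pvFindFromAux p (t.drop start) start

-- `while True: pos = find(...); if pos == -1: break; …; start = pos + 1`
-- (fuel = len(norm_text)+1 bounds the loop: each round start strictly grows)
def pvLoopA (text nt : List Char) (tp : List Int) (np : List Char) : Nat → Nat → List (Int × Int)
  | 0, _ => []
  | fuel + 1, start =>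
    let pos := pvFindFrom nt np start
    if pos < 0 then []
    else
      let p := pos.toNat
      let norm_end := p + np.length
      let orig_start := tp.getD p 0   -- index provably in range; 0 never read
      -- (the inner `while … break` of A runs zero iterations; the `norm_end <= len` else-branch kept)
      let orig_end : Int :=
        if norm_end ≤ tp.length then tp.getD (norm_end - 1) 0 + 1 else (text.length : Int)
      (orig_start, orig_end) :: pvLoopA text nt tp np fuel (p + 1)

def strategy_whitespace_normalized_py (text : String) (pattern : String) : List (Int × Int) :=
  let nr := pvNormA text.toList.length text.toList 0
  let pr := pvNormA pattern.toList.length pattern.toList 0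
  if pr.1.isEmpty then []
  else pvLoopA text.toList nr.1 nr.2 pr.1 (nr.1.length + 1) 0

-- ===== PORT B =====

-- _normalize of Source B: one pass, prev_ws flag
def pvNormB : List Char → Int → Bool → List Char × List Int
  | [], _, _ => ([], [])
  | c :: rest, i, prev =>
    if pvWs c then
      if prev then pvNormB rest (i + 1) true
      else
        let r := pvNormB rest (i + 1) true
        (' ' :: r.1, i :: r.2)
    else
      let r := pvNormB rest (i + 1) false
      (c :: r.1, i :: r.2)

-- `while q > 0 and p[i] != p[q]: q = pi[q-1]` — under the prefix-function invariant each
-- round strictly decreases q, so fuel = initial q suffices (reads never leave range)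
def pvFall (p : List Char) (pi : List Nat) (c : Char) : Nat → Nat → Nat
  | 0, q => q
  | fuel + 1, q =>
    if q ≠ 0 ∧ c ≠ p.getD q ' ' then pvFall p pi c fuel (pi.getD (q - 1) 0) else q

-- the while loop followed by `if c == p[q]: q += 1`
def pvStep (p : List Char) (pi : List Nat) (c : Char) (q : Nat) : Nat :=
  let q' := pvFall p pi c q q
  if c = p.getD q' ' ' then q' + 1 else q'

-- _build_pi of Source B: `pi = [0]; q = 0; for i in range(1, len(p)): … ; pi.append(q)`
def pvBuildPi (p : List Char) : List Nat :=
  ((List.range' 1 (p.length - 1)).foldl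
    (fun (st : List Nat × Nat) i =>
      let q := pvStep p st.1 (p.getD i ' ') st.2
      (st.1 ++ [q], q)) ([0], 0)).1

-- the matcher loop of Source B: `for i, c in enumerate(nt): if q == m: q = pi[m-1]; …`
def pvKmpScan (p : List Char) (pi : List Nat) (tp : List Int) : List Char → Nat → Nat → List (Int × Int)
  | [], _, _ => []
  | c :: rest, i, q =>
    let q1 := if q = p.length then pi.getD (p.length - 1) 0 else q
    let q2 := pvStep p pi c q1
    (if q2 = p.length then [(tp.getD (i + 1 - p.length) 0, tp.getD i 0 + 1)] else [])
      ++ pvKmpScan p pi tp rest (i + 1) q2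

def strategy_whitespace_normalized_py_alt (text : String) (pattern : String) : List (Int × Int) :=
  let nr := pvNormB text.toList 0 false
  let pr := pvNormB pattern.toList 0 false
  if pr.1.isEmpty then []
  else pvKmpScan pr.1 (pvBuildPi pr.1) nr.2 nr.1 0 0

-- ===== PRECONDITION & SPEC =====
def Spec_strategy_whitespace_normalized_py (text : String) (pattern : String) (out : List (Int × Int)) : Prop := out = strategy_whitespace_normalized_py_alt text pattern
instance (text : String) (pattern : String) (out : List (Int × Int)) : Decidable (Spec_strategy_whitespace_normalized_py text pattern out) := by unfold Spec_strategy_whitespace_normalized_py; infer_instance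

-- ===== CLAIM (what is proved, stated in full; the proofs are below) =====
def Claim_equal_strategy_whitespace_normalized_py : Prop := ∀ (text : String) (pattern : String), Dom_strategy_whitespace_normalized_py text pattern → Spec_strategy_whitespace_normalized_py text pattern (strategy_whitespace_normalized_py text pattern)

-- ===== LEMMAS AND PROOFS =====

-- after prev=true, the next char is non-ws or the list is over, where prev is irrelevant
theorem pvNormB_true_false (l : List Char) (i : Int)
    (h : l = [] ∨ ∃ c rest, l = c :: rest ∧ pvWs c = false) :
    pvNormB l i true = pvNormB l i false := by
  rcases h with h | ⟨c, rest, rfl, hc⟩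
  · subst h; rfl
  · simp [pvNormB, hc]

theorem pvNormB_skip (l : List Char) (i : Int) :
    pvNormB l i true = pvNormB (l.drop (pvSkipWs l)) (i + (pvSkipWs l : Int)) true := by
  induction l generalizing i with
  | nil => simp [pvSkipWs]
  | cons c rest ih =>
    by_cases hc : pvWs c
    · have : pvNormB (c :: rest) i true = pvNormB rest (i + 1) true := by simp [pvNormB, hc]
      rw [this, ih]
      simp only [pvSkipWs, hc, if_pos]
      norm_num
      ring_nf
    · simp [pvSkipWs, hc]

theorem pvSkipWs_drop_head (l : List Char) :
    l.drop (pvSkipWs l) = [] ∨ ∃ c rest, l.drop (pvSkipWs l) = c :: rest ∧ pvWs c = false := by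
  induction l with
  | nil => left; rfl
  | cons c rest ih =>
    by_cases hc : pvWs c
    · simpa [pvSkipWs, hc] using ih
    · right; exact ⟨c, rest, by simp [pvSkipWs, hc], by simpa using hc⟩

-- the two normalizations agree
theorem pvNorm_eq : ∀ (fuel : Nat) (l : List Char) (i : Int), l.length ≤ fuel →
    pvNormA fuel l i = pvNormB l i false := by
  intro fuel
  induction fuel with
  | zero =>
    intro l i hl
    have : l = [] := by cases l <;> simp_all
    subst this; rfl
  | succ fuel ih =>
    intro l i hl
    cases l with
    | nil => rfl
    | cons c rest =>
      by_cases hc : pvWs c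
      · have hk : pvSkipWs (c :: rest) = pvSkipWs rest + 1 := by simp [pvSkipWs, hc]
        have hfuel : ((c :: rest).drop (pvSkipWs (c :: rest))).length ≤ fuel := by
          simp only [List.length_drop, hk, List.length_cons] at *
          omega
        have hdrop : (c :: rest).drop (pvSkipWs (c :: rest)) = rest.drop (pvSkipWs rest) := by
          rw [hk]; rfl
        have hA : pvNormA (fuel + 1) (c :: rest) i
            = (' ' :: (pvNormA fuel ((c :: rest).drop (pvSkipWs (c :: rest)))
                (i + (pvSkipWs (c :: rest) : Int))).1,
               i :: (pvNormA fuel ((c :: rest).drop (pvSkipWs (c :: rest)))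
                (i + (pvSkipWs (c :: rest) : Int))).2) := by
          simp [pvNormA, hc]
        have hB : pvNormB (c :: rest) i false
            = (' ' :: (pvNormB rest (i + 1) true).1, i :: (pvNormB rest (i + 1) true).2) := by
          simp [pvNormB, hc]
        rw [hA, hB, pvNormB_skip rest (i + 1),
            pvNormB_true_false _ _ (pvSkipWs_drop_head rest),
            ← ih _ _ (by rw [hdrop] at hfuel; exact hfuel), hdrop, hk]
        norm_num
        constructor <;> ring_nf
      · have hA : pvNormA (fuel + 1) (c :: rest) i
            = (c :: (pvNormA fuel rest (i + 1)).1, i :: (pvNormA fuel rest (i + 1)).2) := by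
          simp [pvNormA, hc]
        rw [hA, ih rest (i + 1) (by simp at hl; omega)]
        simp [pvNormB, hc]

-- both components of pvNormB have the same length
theorem pvNormB_len (l : List Char) (i : Int) (prev : Bool) :
    (pvNormB l i prev).1.length = (pvNormB l i prev).2.length := by
  induction l generalizing i prev with
  | nil => rfl
  | cons c rest ih =>
    by_cases hc : pvWs c
    · cases prev <;> simp [pvNormB, hc, ih]
    · simp [pvNormB, hc, ih]

-- find on a suffix shorter than the pattern fails
theorem pvFindFromAux_short (p : List Char) (hp : p ≠ []) :
    ∀ (s : List Char) (idx : Nat), s.length < p.length → pvFindFromAux p s idx = -1 := by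
  intro s
  induction s with
  | nil =>
    intro idx h
    have hne : ¬ (([] : List Char) = p) := fun he => hp he.symm
    simp [pvFindFromAux, hne]
  | cons c rest ih =>
    intro idx h
    have hne : ¬ ((c :: rest).take p.length = p) := by
      intro he
      have h2 := congrArg List.length he
      rw [List.length_take] at h2
      omega
    simp only [pvFindFromAux, hne, if_neg, not_false_iff]
    exact ih (idx + 1) (by simp at h ⊢; omega)

theorem pvFindFrom_none (t p : List Char) (start : Nat) (hp : p ≠ [])
    (h : ¬ start + p.length ≤ t.length) : pvFindFrom t p start = -1 := by
  apply pvFindFromAux_short p hp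
  have hp1 : 1 ≤ p.length := by cases p <;> simp_all
  simp only [List.length_drop]
  omega

theorem pvFindFrom_hit (t p : List Char) (start : Nat)
    (h : (t.drop start).take p.length = p) : pvFindFrom t p start = (start : Int) := by
  rw [pvFindFrom]
  rcases hd : t.drop start with _ | ⟨c, rest⟩ <;> rw [hd] at h <;> simp [pvFindFromAux, h]

theorem pvFindFrom_step (t p : List Char) (start : Nat)
    (h : start + p.length ≤ t.length) (hp : p ≠ [])
    (hm : (t.drop start).take p.length ≠ p) :
    pvFindFrom t p start = pvFindFrom t p (start + 1) := by
  have hp1 : 1 ≤ p.length := by cases p <;> simp_all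
  have hlen : 0 < (t.drop start).length := by simp only [List.length_drop]; omega
  rcases hd : t.drop start with _ | ⟨c, rest⟩
  · rw [hd] at hlen; simp at hlen
  · have htl : (List.drop start t).tail = List.drop (start + 1) t := List.tail_drop
    have hrest : rest = t.drop (start + 1) := by rw [hd] at htl; simpa using htl
    rw [pvFindFrom, hd]
    rw [hd] at hm
    simp only [pvFindFromAux, hm, if_neg, not_false_iff]
    rw [hrest]
    rfl

-- one window of the naive scan (the common specification of both matchers)
def pvWin (nt : List Char) (tp : List Int) (np : List Char) (i : Nat) : List (Int × Int) :=
  if (nt.drop i).take np.length = np then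
    [(tp.getD i 0, tp.getD (i + np.length - 1) 0 + 1)]
  else []

-- A's find/restart loop = the naive window scan, from any start with enough fuel
theorem pvLoop_eq (text nt : List Char) (tp : List Int) (np : List Char)
    (hlen : nt.length = tp.length) (hnp : np ≠ []) :
    ∀ (k start fuel : Nat), nt.length + 1 - start = k → k ≤ fuel →
      pvLoopA text nt tp np fuel start
        = (List.range' start (nt.length + 1 - np.length - start)).flatMap (pvWin nt tp np) := by
  intro k
  induction k using Nat.strong_induction_on with
  | _ k ih =>
    intro start fuel hk hf
    have hp1 : 1 ≤ np.length := by cases np <;> simp_all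
    cases fuel with
    | zero =>
      have hstart : nt.length + 1 ≤ start := by omega
      have hc : nt.length + 1 - np.length - start = 0 := by omega
      rw [hc]
      rfl
    | succ fuel =>
      by_cases h : start + np.length ≤ nt.length
      · by_cases hm : (nt.drop start).take np.length = np
        · have hc : nt.length + 1 - np.length - start
              = (nt.length + 1 - np.length - (start + 1)) + 1 := by omega
          rw [hc, List.range'_succ, List.flatMap_cons]
          have hloop : pvLoopA text nt tp np (fuel + 1) start
              = ((tp.getD start 0 : Int),
                 (if start + np.length ≤ tp.length then tp.getD (start + np.length - 1) 0 + 1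
                  else (text.length : Int)))
                :: pvLoopA text nt tp np fuel (start + 1) := by
            rw [pvLoopA, pvFindFrom_hit nt np start hm]
            simp
          rw [hloop, if_pos (by omega : start + np.length ≤ tp.length)]
          have hwin : pvWin nt tp np start
              = [(tp.getD start 0, tp.getD (start + np.length - 1) 0 + 1)] := by
            rw [pvWin, if_pos hm]
          rw [hwin]
          simp only [List.singleton_append]
          congr 1
          exact ih (nt.length + 1 - (start + 1)) (by omega) (start + 1) fuel rfl (by omega)
        · have hstep : pvLoopA text nt tp np (fuel + 1) start
              = pvLoopA text nt tp np (fuel + 1) (start + 1) := by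
            rw [pvLoopA, pvLoopA, pvFindFrom_step nt np start h hnp hm]
          rw [hstep,
            ih (nt.length + 1 - (start + 1)) (by omega) (start + 1) (fuel + 1) rfl (by omega)]
          have hc : nt.length + 1 - np.length - start
              = (nt.length + 1 - np.length - (start + 1)) + 1 := by omega
          rw [hc, List.range'_succ, List.flatMap_cons]
          have hwin : pvWin nt tp np start = [] := by rw [pvWin, if_neg hm]
          rw [hwin, List.nil_append]
      · have hc : nt.length + 1 - np.length - start = 0 := by omega
        rw [hc, pvLoopA, pvFindFrom_none nt np start hnp h]
        rfl

-- ===== KMP correctness =====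

-- a suffix of a suffix: the shorter of two suffixes of x is a suffix of the longer
theorem pvSufSuf (a b x : List Char) (ha : a <:+ x) (hb : b <:+ x)
    (h : a.length ≤ b.length) : a <:+ b := by
  rw [List.suffix_iff_eq_drop] at ha hb
  have hbl : b.length ≤ x.length := by
    rw [hb]; simp
  rw [List.suffix_iff_eq_drop, hb, List.drop_drop]
  rw [ha, hb]
  congr 1
  simp only [List.length_drop]
  omega

theorem pvTakeSnoc (p : List Char) (k : Nat) (h : k < p.length) :
    p.take (k + 1) = p.take k ++ [p.getD k ' '] := by
  rw [List.take_succ_eq_append_getElem h, List.getD_eq_getElem p ' ' h]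

theorem pvSnocSuffixSnoc (a x : List Char) (d c : Char) :
    a ++ [d] <:+ x ++ [c] ↔ a <:+ x ∧ d = c := by
  constructor
  · intro h
    rw [← List.reverse_prefix] at h
    simp only [List.reverse_append, List.reverse_cons, List.reverse_nil, List.nil_append,
      List.singleton_append] at h
    rw [List.cons_prefix_cons] at h
    exact ⟨by rw [← List.reverse_prefix]; exact h.2, h.1⟩
  · rintro ⟨⟨t, ht⟩, rfl⟩
    exact ⟨t, by rw [← List.append_assoc, ht]⟩

theorem pvTakeSuffixSnoc (p x : List Char) (c : Char) (k : Nat) (h1 : 1 ≤ k)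
    (h2 : k ≤ p.length) :
    (p.take k <:+ x ++ [c]) ↔ (p.take (k - 1) <:+ x ∧ p.getD (k - 1) ' ' = c) := by
  have hk : k - 1 < p.length := by omega
  have he : p.take k = p.take (k - 1) ++ [p.getD (k - 1) ' '] := by
    have := pvTakeSnoc p (k - 1) hk
    rwa [Nat.sub_add_cancel h1] at this
  rw [he, pvSnocSuffixSnoc]

-- the prefix-function specification for the entries 1..n of the table pi:
-- pi[q-1] is the length of the longest proper border of p[:q]
def pvPiOK (p : List Char) (pi : List Nat) (n : Nat) : Prop :=
  ∀ q, 1 ≤ q → q ≤ n →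
    pi.getD (q - 1) 0 < q ∧ p.take (pi.getD (q - 1) 0) <:+ p.take q ∧
    ∀ k, k < q → p.take k <:+ p.take q → k ≤ pi.getD (q - 1) 0

-- the fall-back while loop lands on the longest border whose next char matches c
theorem pvFall_spec (p : List Char) (pi : List Nat) (c : Char) (x : List Char) (n : Nat)
    (hpi : pvPiOK p pi n) :
    ∀ fuel j, j ≤ fuel → j ≤ n → j < p.length → p.take j <:+ x →
      (∀ k, k < p.length → p.take k <:+ x → p.getD k ' ' = c → k ≤ j) →
      (pvFall p pi c fuel j < p.length ∧
       p.take (pvFall p pi c fuel j) <:+ x ∧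
       (∀ k, k < p.length → p.take k <:+ x → p.getD k ' ' = c → k ≤ pvFall p pi c fuel j) ∧
       (c = p.getD (pvFall p pi c fuel j) ' ' ∨ pvFall p pi c fuel j = 0)) := by
  intro fuel
  induction fuel with
  | zero =>
    intro j hf _ hjl hjx hmax
    have : j = 0 := by omega
    subst this
    exact ⟨hjl, hjx, hmax, Or.inr rfl⟩
  | succ fuel ih =>
    intro j hf hjn hjl hjx hmax
    by_cases h : j ≠ 0 ∧ c ≠ p.getD j ' '
    · have hq := hpi j (by omega) hjn
      set j' := pi.getD (j - 1) 0 with hj'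
      have hlt : j' < j := hq.1
      have hstep : pvFall p pi c (fuel + 1) j = pvFall p pi c fuel j' := by
        rw [pvFall, if_pos h]
      rw [hstep]
      apply ih j' (by omega) (by omega) (by omega)
      · exact hq.2.1.trans hjx
      · intro k hk hkx hkc
        have hkj : k ≠ j := by
          intro he; subst he; exact h.2 hkc.symm
        have hklt : k < j := lt_of_le_of_ne (hmax k hk hkx hkc) hkj
        apply hq.2.2 k hklt
        apply pvSufSuf _ _ x hkx hjx
        simp only [List.length_take]
        omega
    · have hstep : pvFall p pi c (fuel + 1) j = j := by rw [pvFall, if_neg h]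
      rw [hstep]
      refine ⟨hjl, hjx, hmax, ?_⟩
      by_cases hj0 : j = 0
      · exact Or.inr hj0
      · have hcp : ¬ c ≠ p.getD j ' ' := fun hc => h ⟨hj0, hc⟩
        exact Or.inl (not_not.mp hcp)

-- one automaton step: from the longest proper-bounded match after x to the longest
-- (possibly full) match after x ++ [c]
theorem pvStep_spec (p : List Char) (pi : List Nat) (c : Char) (x : List Char) (n : Nat)
    (hpi : pvPiOK p pi n) (j : Nat) (hjn : j ≤ n) (hjl : j < p.length)
    (hjx : p.take j <:+ x) (hmax : ∀ k, k < p.length → p.take k <:+ x → k ≤ j) :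
    pvStep p pi c j ≤ p.length ∧ p.take (pvStep p pi c j) <:+ (x ++ [c]) ∧
    ∀ k, k ≤ p.length → p.take k <:+ (x ++ [c]) → k ≤ pvStep p pi c j := by
  have hfall := pvFall_spec p pi c x n hpi j j le_rfl hjn hjl hjx
    (fun k hk hkx _ => hmax k hk hkx)
  set r := pvFall p pi c j j with hr
  obtain ⟨hrl, hrx, hrmax, hror⟩ := hfall
  by_cases hc : c = p.getD r ' '
  · have hres : pvStep p pi c j = r + 1 := by rw [pvStep, ← hr, if_pos hc]
    rw [hres]
    refine ⟨by omega, ?_, ?_⟩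
    · rw [pvTakeSnoc p r hrl, ← hc]
      obtain ⟨t, ht⟩ := hrx
      exact ⟨t, by rw [← List.append_assoc, ht]⟩
    · intro k hk hkx
      rcases Nat.eq_zero_or_pos k with hk0 | hk1
      · omega
      · rw [pvTakeSuffixSnoc p x c k hk1 hk] at hkx
        have := hrmax (k - 1) (by omega) hkx.1 hkx.2
        omega
  · have hr0 : r = 0 := by
      rcases hror with h1 | h2
      · exact absurd h1 hc
      · exact h2
    have hres : pvStep p pi c j = r := by rw [pvStep, ← hr, if_neg hc]
    rw [hres, hr0]
    refine ⟨by omega, by simp, ?_⟩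
    intro k hk hkx
    rcases Nat.eq_zero_or_pos k with hk0 | hk1
    · omega
    · rw [pvTakeSuffixSnoc p x c k hk1 hk] at hkx
      have h1 := hrmax (k - 1) (by omega) hkx.1 hkx.2
      rw [hr0] at h1
      have hke : k = 1 := by omega
      have h3 : p.getD 0 ' ' = c := by
        have h4 := hkx.2
        rw [hke] at h4
        exact h4
      rw [hr0] at hc
      exact absurd h3.symm hc

-- the q == m reset at the top of the matcher loop: full match becomes its longest
-- proper border, turning "longest match ≤ m" into "longest match < m"
theorem pvReset_spec (p : List Char) (pi : List Nat) (x : List Char) (q : Nat)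
    (hp : p ≠ []) (hpi : pvPiOK p pi p.length) (hq : q ≤ p.length)
    (hx : p.take q <:+ x) (hmax : ∀ k, k ≤ p.length → p.take k <:+ x → k ≤ q) :
    (if q = p.length then pi.getD (p.length - 1) 0 else q) < p.length ∧
    p.take (if q = p.length then pi.getD (p.length - 1) 0 else q) <:+ x ∧
    ∀ k, k < p.length → p.take k <:+ x →
      k ≤ (if q = p.length then pi.getD (p.length - 1) 0 else q) := by
  have hm1 : 1 ≤ p.length := List.length_pos_iff.mpr hp
  by_cases hqm : q = p.length
  · rw [if_pos hqm]
    have hspec := hpi p.length hm1 le_rfl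
    have hpx : p <:+ x := by
      rw [hqm, List.take_length] at hx; exact hx
    refine ⟨hspec.1, ?_, ?_⟩
    · have h2 := hspec.2.1
      rw [List.take_length] at h2
      exact h2.trans hpx
    · intro k hk hkx
      apply hspec.2.2 k hk
      rw [List.take_length]
      apply pvSufSuf _ _ x hkx hpx
      simp only [List.length_take]
      omega
  · rw [if_neg hqm]
    exact ⟨by omega, hx, fun k hk hkx => hmax k (by omega) hkx⟩

-- the KMP scan equals the per-endpoint match list
theorem pvScan_eq (p : List Char) (pi : List Nat) (tp : List Int) (nt : List Char)
    (hp : p ≠ []) (hpi : pvPiOK p pi p.length) :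
    ∀ cnt i0 q, i0 + cnt = nt.length → q ≤ p.length → p.take q <:+ nt.take i0 →
      (∀ k, k ≤ p.length → p.take k <:+ nt.take i0 → k ≤ q) →
      pvKmpScan p pi tp (nt.drop i0) i0 q =
        (List.range' i0 cnt).flatMap (fun i =>
          if p <:+ nt.take (i + 1) then
            [(tp.getD (i + 1 - p.length) 0, tp.getD i 0 + 1)]
          else []) := by
  intro cnt
  induction cnt with
  | zero =>
    intro i0 q hi0 _ _ _
    rw [List.drop_eq_nil_of_le (by omega)]
    rfl
  | succ cnt ih =>
    intro i0 q hi0 hq hx hmax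
    have hlt : i0 < nt.length := by omega
    rw [List.drop_eq_getElem_cons hlt]
    have hreset := pvReset_spec p pi (nt.take i0) q hp hpi hq hx hmax
    set q1 := if q = p.length then pi.getD (p.length - 1) 0 else q with hq1
    obtain ⟨h1l, h1x, h1max⟩ := hreset
    have htake : nt.take (i0 + 1) = nt.take i0 ++ [nt[i0]] :=
      List.take_succ_eq_append_getElem hlt
    have hstep := pvStep_spec p pi (nt[i0]) (nt.take i0) p.length hpi q1 (by omega) h1l h1x h1max
    set q2 := pvStep p pi (nt[i0]) q1 with hq2
    rw [← htake] at hstep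
    obtain ⟨h2l, h2x, h2max⟩ := hstep
    have hiff : q2 = p.length ↔ p <:+ nt.take (i0 + 1) := by
      constructor
      · intro h
        rw [h, List.take_length] at h2x
        exact h2x
      · intro h
        have := h2max p.length le_rfl (by rw [List.take_length]; exact h)
        omega
    have hscan : pvKmpScan p pi tp (nt[i0] :: nt.drop (i0 + 1)) i0 q
        = (if q2 = p.length then [(tp.getD (i0 + 1 - p.length) 0, tp.getD i0 0 + 1)] else [])
          ++ pvKmpScan p pi tp (nt.drop (i0 + 1)) (i0 + 1) q2 := by
      rw [pvKmpScan]
    rw [hscan, List.range'_succ, List.flatMap_cons]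
    congr 1
    · by_cases h : q2 = p.length
      · rw [if_pos h, if_pos (hiff.1 h)]
      · rw [if_neg h, if_neg (fun hc => h (hiff.2 hc))]
    · exact ih (i0 + 1) q2 (by omega) h2l h2x h2max

-- accessing the freshly appended table entry
theorem pvGetDSnocLen (l : List Nat) (a : Nat) : (l ++ [a]).getD l.length 0 = a := by
  simp [List.getD_eq_getElem?_getD]

-- border bridge: suffixes of p[1:][:t] of length ≤ |p| are exactly the proper borders
-- of p[:t+1]
theorem pvBridge (p : List Char) (t k : Nat) (ht : t + 1 ≤ p.length) (hk : k ≤ p.length) :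
    (p.take k <:+ (p.drop 1).take t) ↔ (k ≤ t ∧ p.take k <:+ p.take (t + 1)) := by
  have hdt : (p.take (t + 1)).drop 1 = (p.drop 1).take t := by
    rw [List.drop_take]
    congr 1
  constructor
  · intro h
    have hlen : k ≤ t := by
      have := List.IsSuffix.length_le h
      simp only [List.length_take, List.length_drop] at this
      omega
    refine ⟨hlen, ?_⟩
    rw [← hdt] at h
    exact h.trans (List.drop_suffix 1 _)
  · rintro ⟨hkt, h⟩
    rw [List.suffix_iff_eq_drop] at h
    have hly : (p.take (t + 1)).length = t + 1 := by
      simp only [List.length_take]; omega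
    have hlk : (p.take k).length = k := by
      simp only [List.length_take]; omega
    rw [hly, hlk] at h
    rw [← hdt]
    have : (p.take (t + 1)).drop (t + 1 - k) = ((p.take (t + 1)).drop 1).drop (t - k) := by
      rw [List.drop_drop]
      congr 1
      omega
    rw [this] at h
    rw [h]
    exact List.drop_suffix _ _

-- the state of _build_pi after processing p[1..t]
def pvBuildState (p : List Char) (t : Nat) : List Nat × Nat :=
  (List.range' 1 t).foldl
    (fun (st : List Nat × Nat) i =>
      let q := pvStep p st.1 (p.getD i ' ') st.2
      (st.1 ++ [q], q)) ([0], 0)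

-- invariant of the table construction: all produced entries satisfy the prefix-function
-- spec and the running state is the longest border of the processed prefix of p[1:]
theorem pvBuild_inv (p : List Char) (hp : p ≠ []) :
    ∀ t, t ≤ p.length - 1 →
      (pvBuildState p t).1.length = t + 1 ∧
      pvPiOK p (pvBuildState p t).1 (t + 1) ∧
      (pvBuildState p t).2 ≤ t ∧
      p.take (pvBuildState p t).2 <:+ (p.drop 1).take t ∧
      (∀ k, k ≤ p.length → p.take k <:+ (p.drop 1).take t → k ≤ (pvBuildState p t).2) := by
  have hm1 : 1 ≤ p.length := List.length_pos_iff.mpr hp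
  intro t
  induction t with
  | zero =>
    intro _
    have hbs : pvBuildState p 0 = ([0], 0) := rfl
    rw [hbs]
    refine ⟨rfl, ?_, le_rfl, by simp, ?_⟩
    · intro q h1 h2
      have hq1 : q = 1 := by omega
      subst hq1
      refine ⟨by simp, by simp, ?_⟩
      intro k hk _
      simp
      omega
    · intro k _ hkx
      simp only [List.take_zero] at hkx
      have := List.suffix_nil.mp hkx
      rcases List.take_eq_nil_iff.mp this with h | h
      · omega
      · exact absurd h hp
  | succ t iht =>
    intro hts
    have ihyp := iht (by omega)
    obtain ⟨hlen, hpiok, hqt, hqx, hqmax⟩ := ihyp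
    have hstate : pvBuildState p (t + 1)
        = ((pvBuildState p t).1 ++ [pvStep p (pvBuildState p t).1 (p.getD (1 + t) ' ')
            (pvBuildState p t).2],
           pvStep p (pvBuildState p t).1 (p.getD (1 + t) ' ') (pvBuildState p t).2) := by
      rw [pvBuildState, List.range'_1_concat, List.foldl_append]
      rfl
    set pi := (pvBuildState p t).1 with hpi
    set q := (pvBuildState p t).2 with hqdef
    set c := p.getD (1 + t) ' ' with hc
    -- the processed text grows by one char: p[1:][:t+1] = p[1:][:t] ++ [p[1+t]]
    have htlen : t < (p.drop 1).length := by
      simp only [List.length_drop]; omega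
    have hchar : (p.drop 1).getD t ' ' = c := by
      rw [List.getD_eq_getElem _ _ htlen, hc,
        List.getD_eq_getElem _ _ (by omega : 1 + t < p.length)]
      exact List.getElem_drop
    have hx' : (p.drop 1).take (t + 1) = (p.drop 1).take t ++ [c] := by
      rw [pvTakeSnoc (p.drop 1) t htlen, hchar]
    have hql : q < p.length := by omega
    have hstep := pvStep_spec p pi c ((p.drop 1).take t) (t + 1) hpiok q (by omega) hql hqx
      (fun k hk hkx => hqmax k (by omega) hkx)
    rw [← hx'] at hstep
    set q' := pvStep p pi c q with hq'
    obtain ⟨h'l, h'x, h'max⟩ := hstep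
    have hq't : q' ≤ t + 1 := by
      have := List.IsSuffix.length_le h'x
      simp only [List.length_take, List.length_drop] at this
      omega
    rw [hstate]
    refine ⟨by simp [hlen], ?_, hq't, h'x, h'max⟩
    -- the extended table satisfies the spec up to t+2
    intro q'' h1 h2
    by_cases hle : q'' ≤ t + 1
    · have hidx : q'' - 1 < pi.length := by omega
      have hgd : (pi ++ [q']).getD (q'' - 1) 0 = pi.getD (q'' - 1) 0 :=
        List.getD_append pi [q'] 0 (q'' - 1) hidx
      rw [hgd]
      exact hpiok q'' h1 hle
    · have hq''e : q'' = t + 2 := by omega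
      subst hq''e
      have hgd : (pi ++ [q']).getD (t + 2 - 1) 0 = q' := by
        have : t + 2 - 1 = pi.length := by omega
        rw [this]
        exact pvGetDSnocLen pi q'
      rw [hgd]
      have ht1 : (t + 1) + 1 ≤ p.length := by omega
      refine ⟨by omega, ?_, ?_⟩
      · exact ((pvBridge p (t + 1) q' ht1 h'l).mp h'x).2
      · intro k hk hkx
        have hkle : k ≤ p.length := by omega
        apply h'max k hkle
        exact (pvBridge p (t + 1) k ht1 hkle).mpr ⟨by omega, hkx⟩

-- the constructed table satisfies the prefix-function spec on all of p
theorem pvBuildPi_ok (p : List Char) (hp : p ≠ []) :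
    pvPiOK p (pvBuildPi p) p.length := by
  have hm1 : 1 ≤ p.length := List.length_pos_iff.mpr hp
  have h := (pvBuild_inv p hp (p.length - 1) le_rfl).2.1
  have he : pvBuildPi p = (pvBuildState p (p.length - 1)).1 := rfl
  rw [he]
  have : p.length - 1 + 1 = p.length := by omega
  rwa [this] at h

-- window at j matches iff the pattern is a suffix of the text up to j+|p|
theorem pvWin_iff (nt p : List Char) (j : Nat) (h : j + p.length ≤ nt.length) :
    ((nt.drop j).take p.length = p) ↔ p <:+ nt.take (j + p.length) := by
  constructor
  · intro hm
    rw [List.take_add, hm]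
    exact ⟨nt.take j, rfl⟩
  · intro hs
    rw [List.suffix_iff_eq_drop] at hs
    have hl : (nt.take (j + p.length)).length = j + p.length := by
      simp only [List.length_take]; omega
    rw [hl] at hs
    have : j + p.length - p.length = j := by omega
    rw [this] at hs
    rw [List.drop_take] at hs
    have : j + p.length - j = p.length := by omega
    rw [this] at hs
    exact hs.symm

-- the naive window scan over starts = the per-endpoint match list over all of nt
theorem pvReindex (nt : List Char) (tp : List Int) (p : List Char) (hp : p ≠ []) :
    (List.range' 0 (nt.length + 1 - p.length)).flatMap (pvWin nt tp p) =
    (List.range' 0 nt.length).flatMap (fun i =>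
      if p <:+ nt.take (i + 1) then
        [(tp.getD (i + 1 - p.length) 0, tp.getD i 0 + 1)]
      else []) := by
  have hm1 : 1 ≤ p.length := List.length_pos_iff.mpr hp
  set m := p.length with hm
  set L := nt.length with hL
  have hlen_take : ∀ i : Nat, p <:+ nt.take (i + 1) → m ≤ i + 1 := by
    intro i h
    have := List.IsSuffix.length_le h
    simp only [List.length_take] at this
    omega
  by_cases hcase : L < m
  · have h0 : L + 1 - m = 0 := by omega
    rw [h0]
    simp only [List.range'_zero, List.flatMap_nil]
    symm
    rw [List.flatMap_eq_nil_iff]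
    intro i hi
    rw [List.mem_range'_1] at hi
    have : ¬ p <:+ nt.take (i + 1) := by
      intro h
      have h2 := List.IsSuffix.length_le h
      simp only [List.length_take] at h2
      omega
    rw [if_neg this]
  · have hcase' : m - 1 ≤ L := by omega
    have hsplit : List.range' 0 L = List.range' 0 (m - 1) ++ List.range' (m - 1) (L - (m - 1)) := by
      have h2 := List.range'_append_1 (s := 0) (m := m - 1) (n := L - (m - 1))
      simp only [Nat.zero_add] at h2
      rw [h2, Nat.add_sub_cancel' hcase']
    rw [hsplit, List.flatMap_append]
    have hfirst : (List.range' 0 (m - 1)).flatMap (fun i =>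
        if p <:+ nt.take (i + 1) then
          [(tp.getD (i + 1 - p.length) 0, tp.getD i 0 + 1)]
        else []) = [] := by
      rw [List.flatMap_eq_nil_iff]
      intro i hi
      rw [List.mem_range'_1] at hi
      have : ¬ p <:+ nt.take (i + 1) := by
        intro h
        have := hlen_take i h
        omega
      rw [if_neg this]
    rw [hfirst, List.nil_append]
    have hr1 : List.range' 0 (L + 1 - m) = List.range (L + 1 - m) :=
      List.range_eq_range'.symm
    have hr2 : List.range' (m - 1) (L - (m - 1)) = (List.range (L - (m - 1))).map ((m - 1) + ·) :=
      List.range'_eq_map_range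
    have hcnt : L - (m - 1) = L + 1 - m := by omega
    rw [hr1, hr2, hcnt]
    rw [List.flatMap_map]
    apply List.flatMap_congr
    intro j hj
    rw [List.mem_range] at hj
    have hjm : j + m ≤ L := by omega
    have hidx : (m - 1) + j + 1 = j + m := by omega
    rw [pvWin]
    have hcond : ((nt.drop j).take p.length = p) ↔ p <:+ nt.take ((m - 1) + j + 1) := by
      rw [hidx]
      exact pvWin_iff nt p j hjm
    by_cases hc : (nt.drop j).take p.length = p
    · rw [if_pos hc, if_pos (hcond.mp hc)]
      have h1 : (m - 1) + j + 1 - p.length = j := by omega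
      have h2 : j + p.length - 1 = (m - 1) + j := by omega
      rw [h1, h2]
    · rw [if_neg hc, if_neg (fun h => hc (hcond.mpr h))]

-- ===== VERDICT (by name: the statement is the Claim_ definition above) =====
theorem strategy_whitespace_normalized_py_spec : Claim_equal_strategy_whitespace_normalized_py := by
  intro text pattern _
  unfold Spec_strategy_whitespace_normalized_py
  unfold strategy_whitespace_normalized_py strategy_whitespace_normalized_py_alt
  rw [pvNorm_eq text.toList.length text.toList 0 le_rfl,
      pvNorm_eq pattern.toList.length pattern.toList 0 le_rfl]
  by_cases hp : (pvNormB pattern.toList 0 false).1.isEmpty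
  · simp [hp]
  · simp only [hp, Bool.false_eq_true, if_neg, not_false_iff]
    have hnp : (pvNormB pattern.toList 0 false).1 ≠ [] := by
      simpa [List.isEmpty_iff] using hp
    set p := (pvNormB pattern.toList 0 false).1 with hpdef
    set nt := (pvNormB text.toList 0 false).1 with hntdef
    set tp := (pvNormB text.toList 0 false).2 with htpdef
    rw [pvLoop_eq text.toList nt tp p (pvNormB_len _ _ _) hnp
        (nt.length + 1) 0 (nt.length + 1) (by omega) le_rfl]
    have hscan := pvScan_eq p (pvBuildPi p) tp nt hnp (pvBuildPi_ok p hnp)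
      nt.length 0 0 (by omega) (by omega) (by simp) ?_
    · rw [Nat.sub_zero]
      rw [pvReindex nt tp p hnp]
      rw [List.drop_zero] at hscan
      exact hscan.symm
    · intro k hk hkx
      simp only [List.take_zero, List.suffix_nil] at hkx
      rcases List.take_eq_nil_iff.mp hkx with h | h
      · omega
      · exact absurd h hnp
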